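-- pv_equiv track=rewrite | github.com/paullozen/autofx | suggestion_generator.py | group_lines
-- ===== SOURCE A (Python) =====
-- def group_lines(lines, group_size: int):
--     if group_size <= 1:
--         return lines
--     chunks = []
--     for i in range(0, len(lines), group_size):
--         chunk_lines = [line for line in lines[i : i + group_size] if line]
--         if not chunk_lines:
--             continue
--         chunk = "\n".join(chunk_lines).strip()
--         if chunk:
--             chunks.append(chunk)
--     return chunks
-- ===== SOURCE B (Python) =====
-- def _flush(buf, chunks):
--     if buf:
--         chunk = "\n".join(buf).strip()
--         if chunk:
--             chunks.append(chunk)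
--
--
-- def group_lines(lines, group_size: int):
--     if group_size <= 1:
--         return lines
--     chunks = []
--     buf = []
--     count = 0
--     for line in lines:
--         count += 1
--         if line:
--             buf.append(line)
--         if count == group_size:
--             _flush(buf, chunks)
--             buf = []
--             count = 0
--     if count:
--         _flush(buf, chunks)
--     return chunks
-- ===== Notes on version B (the rewrite author's own statement) =====
-- stated objective: alternative
-- what changed: Replaces the range/slice-indexed grouping (range(0, len, k) plus lines[i:i+k] slicing) with a single streaming pass that keeps a buffer of the current group's non-empty lines and a counter over all lines, flushing the buffer whenever it represents group_size lines and once more at the end.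
import Mathlib
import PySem

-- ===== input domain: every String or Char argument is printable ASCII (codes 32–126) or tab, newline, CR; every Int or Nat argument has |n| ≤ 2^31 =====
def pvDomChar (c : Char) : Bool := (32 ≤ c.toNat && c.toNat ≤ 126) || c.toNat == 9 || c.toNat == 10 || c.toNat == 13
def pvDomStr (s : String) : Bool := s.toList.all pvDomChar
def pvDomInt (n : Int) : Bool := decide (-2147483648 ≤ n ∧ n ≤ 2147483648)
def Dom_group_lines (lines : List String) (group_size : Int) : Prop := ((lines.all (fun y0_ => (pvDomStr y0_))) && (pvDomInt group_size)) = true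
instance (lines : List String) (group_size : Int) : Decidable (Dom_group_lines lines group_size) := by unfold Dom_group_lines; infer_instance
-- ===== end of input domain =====

-- B replaces A's range/slice-indexed grouping by a single streaming pass with a buffer and counter (alternative decomposition, same cost).


-- ===== PORT A =====
def group_lines (lines : List String) (group_size : Int) : List String :=
  if group_size ≤ 1 then lines
  else
    (PySem.List.pyRange 0 (PySem.List.len lines) group_size).foldl
      (fun chunks i =>
        let chunk_lines :=
          (PySem.List.slice lines (some i) (some (i + group_size))).filter (fun line => line ≠ "")
        if chunk_lines = [] then chunks
        else
          let chunk := PySem.Str.strip (PySem.Str.join "\n" chunk_lines)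
          if chunk ≠ "" then chunks ++ [chunk] else chunks) []

-- ===== PORT B =====
-- _flush helper of Source B
def glFlush (buf : List String) (chunks : List String) : List String :=
  if buf = [] then chunks
  else
    let chunk := PySem.Str.strip (PySem.Str.join "\n" buf)
    if chunk ≠ "" then chunks ++ [chunk] else chunks

-- the streaming for-loop of Source B over the remaining lines, carrying buffer, counter and output
def glLoop (gs : Int) : List String → List String → Int → List String → List String
  | [], buf, count, chunks => if count ≠ 0 then glFlush buf chunks else chunks
  | l :: ls, buf, count, chunks =>
      let count' := count + 1
      let buf' := if l ≠ "" then buf ++ [l] else buf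
      if count' = gs then glLoop gs ls [] 0 (glFlush buf' chunks)
      else glLoop gs ls buf' count' chunks

def group_lines_alt (lines : List String) (group_size : Int) : List String :=
  if group_size ≤ 1 then lines
  else glLoop group_size lines [] 0 []

-- ===== PRECONDITION & SPEC =====
def Spec_group_lines (lines : List String) (group_size : Int) (out : List String) : Prop := out = group_lines_alt lines group_size
instance (lines : List String) (group_size : Int) (out : List String) : Decidable (Spec_group_lines lines group_size out) := by unfold Spec_group_lines; infer_instance

-- ===== CLAIM (what is proved, stated in full; the proofs are below) =====
def Claim_equal_group_lines : Prop := ∀ (lines : List String) (group_size : Int), Dom_group_lines lines group_size → Spec_group_lines lines group_size (group_lines lines group_size)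

-- ===== LEMMAS AND PROOFS =====

-- common reference form: process the chunk of the first g lines, recurse on the rest
def aProc (g : Nat) : List String → List String → List String
  | [], chunks => chunks
  | l :: ls, chunks =>
      aProc g (ls.drop (g - 1)) (glFlush (((l :: ls).take g).filter (fun x => x ≠ "")) chunks)
  termination_by ls => ls.length
  decreasing_by simp

lemma pyRange_nil_pos (a b s : Int) (hs : 0 < s) (hba : b ≤ a) :
    PySem.List.pyRange a b s = [] := by
  rw [PySem.List.pyRange_of_pos _ _ hs]
  simp [show ¬ a < b by omega]

lemma pyRange_cons_pos (a b s : Int) (hs : 0 < s) (hab : a < b) :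
    PySem.List.pyRange a b s = a :: PySem.List.pyRange (a + s) b s := by
  rw [PySem.List.pyRange_of_pos _ _ hs, PySem.List.pyRange_of_pos _ _ hs]
  have hcnt : (if a < b then ((b - a + s - 1) / s).toNat else 0)
      = (if a + s < b then ((b - (a + s) + s - 1) / s).toNat else 0) + 1 := by
    simp only [if_pos hab]
    by_cases h : a + s < b
    · rw [if_pos h]
      have h1 : b - a + s - 1 = (b - (a + s) + s - 1) + 1 * s := by ring
      rw [h1, Int.add_mul_ediv_right _ _ (by omega : s ≠ 0)]
      have h2 : 0 ≤ (b - (a + s) + s - 1) / s := Int.ediv_nonneg (by omega) (by omega)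
      omega
    · rw [if_neg h]
      have h1 : 1 ≤ (b - a + s - 1) / s := by
        rw [Int.le_ediv_iff_mul_le hs]; omega
      have h2 : (b - a + s - 1) / s < 2 := by
        rw [Int.ediv_lt_iff_lt_mul hs]; omega
      omega
  rw [hcnt, List.range_succ_eq_map, List.map_cons, List.map_map]
  congr 1
  · simp
  · exact List.map_congr_left (fun k _ => by simp [Function.comp]; ring)

lemma pyRange_shift (b s : Int) (hs : 0 < s) :
    PySem.List.pyRange s b s = (PySem.List.pyRange 0 (b - s) s).map (fun i => s + i) := by
  rw [PySem.List.pyRange_of_pos _ _ hs, PySem.List.pyRange_of_pos _ _ hs, List.map_map]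
  have hcnt : (if s < b then ((b - s + s - 1) / s).toNat else 0)
      = (if 0 < b - s then ((b - s - 0 + s - 1) / s).toNat else 0) := by
    by_cases h : s < b
    · rw [if_pos h, if_pos (by omega)]; ring_nf
    · rw [if_neg h, if_neg (by omega)]
  rw [hcnt]
  exact List.map_congr_left (fun k _ => by simp [Function.comp])

-- unfolding lemma for aProc in take/drop form
lemma aProc_step (g : Nat) (hg : 1 ≤ g) (xs : List String) (hxs : xs ≠ []) (chunks : List String) :
    aProc g xs chunks = aProc g (xs.drop g) (glFlush ((xs.take g).filter (fun x => x ≠ "")) chunks) := by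
  cases xs with
  | nil => exact absurd rfl hxs
  | cons y ys =>
    cases g with
    | zero => omega
    | succ m => rw [aProc]; simp

-- A's fold over range(0, len, g) computes aProc
lemma A_fold (gs : Int) (hgs : 2 ≤ gs) :
    ∀ (n : Nat) (lines : List String), lines.length = n → ∀ chunks,
      (PySem.List.pyRange 0 (PySem.List.len lines) gs).foldl
        (fun chunks i =>
          let chunk_lines :=
            (PySem.List.slice lines (some i) (some (i + gs))).filter (fun line => line ≠ "")
          if chunk_lines = [] then chunks
          else
            let chunk := PySem.Str.strip (PySem.Str.join "\n" chunk_lines)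
            if chunk ≠ "" then chunks ++ [chunk] else chunks) chunks
      = aProc gs.toNat lines chunks := by
  intro n
  induction n using Nat.strong_induction_on with
  | _ n IH =>
    intro lines hlen chunks
    cases lines with
    | nil =>
      rw [show PySem.List.len ([] : List String) = 0 by simp [PySem.List.len_eq]]
      rw [pyRange_nil_pos 0 0 gs (by omega) le_rfl]
      simp [aProc]
    | cons l ls =>
      have hpos : (0 : Int) < PySem.List.len (l :: ls) := by
        simp [PySem.List.len_eq]
      rw [pyRange_cons_pos 0 _ gs (by omega) hpos, List.foldl_cons]
      simp only [zero_add]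
      rw [pyRange_shift _ gs (by omega), List.foldl_map]
      -- rewrite the range bound to the dropped list's length
      have hr : PySem.List.pyRange 0 (PySem.List.len (l :: ls) - gs) gs
          = PySem.List.pyRange 0 (PySem.List.len ((l :: ls).drop gs.toNat)) gs := by
        rw [PySem.List.len_eq, PySem.List.len_eq, List.length_drop]
        by_cases h : gs ≤ ((l :: ls).length : Int)
        · congr 1; omega
        · rw [pyRange_nil_pos _ _ _ (by omega) (by omega),
              pyRange_nil_pos _ _ _ (by omega) (by omega)]
      rw [hr]
      -- pointwise: shifting the index by gs = working on the dropped list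
      rw [PySem.List.foldl_congr_mem _ _
        (fun chunks i =>
          let chunk_lines :=
            (PySem.List.slice ((l :: ls).drop gs.toNat) (some i) (some (i + gs))).filter
              (fun line => line ≠ "")
          if chunk_lines = [] then chunks
          else
            let chunk := PySem.Str.strip (PySem.Str.join "\n" chunk_lines)
            if chunk ≠ "" then chunks ++ [chunk] else chunks) _
        (by
          intro acc x hx
          have hx0 : 0 ≤ x := by
            rcases (PySem.List.mem_pyRange_iff_of_pos (by omega : (0:Int) < gs) x).1 hx with ⟨h1, _⟩
            exact h1
          have hslice : PySem.List.slice (l :: ls) (some (gs + x)) (some (gs + x + gs))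
              = PySem.List.slice ((l :: ls).drop gs.toNat) (some x) (some (x + gs)) := by
            rw [PySem.List.slice_toNat _ (by omega) (by omega),
                PySem.List.slice_toNat _ (by omega) (by omega), List.drop_drop]
            have e1 : (gs + x + gs).toNat - (gs + x).toNat = (x + gs).toNat - x.toNat := by omega
            have e2 : (gs + x).toNat = gs.toNat + x.toNat := by omega
            rw [e1, e2]
          simp only [hslice])]
      rw [IH ((l :: ls).drop gs.toNat).length
            (by rw [List.length_drop]; simp at hlen ⊢; omega)
            ((l :: ls).drop gs.toNat) rfl]
      rw [aProc_step gs.toNat (by omega) (l :: ls) (by simp) chunks]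
      congr 1
      have hsl : PySem.List.slice (l :: ls) (some 0) (some gs) = (l :: ls).take gs.toNat := by
        rw [PySem.List.slice_zero_start, PySem.List.slice_to _ (by omega)]
      simp only [hsl, glFlush]

-- B's streaming loop computes aProc
lemma B_loop (gs : Int) (hgs : 2 ≤ gs) :
    ∀ (lines pre chunks : List String), (pre.length : Int) < gs →
      glLoop gs lines (pre.filter (fun x => x ≠ "")) (pre.length : Int) chunks
        = aProc gs.toNat (pre ++ lines) chunks := by
  intro lines
  induction lines with
  | nil =>
    intro pre chunks hpre
    cases pre with
    | nil => simp [glLoop, aProc]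
    | cons p ps =>
      simp only [glLoop, List.append_nil]
      rw [if_pos (by simp; omega)]
      rw [aProc_step gs.toNat (by omega) (p :: ps) (by simp) chunks]
      rw [List.drop_eq_nil_of_le (by simp at hpre ⊢; omega),
          List.take_of_length_le (by simp at hpre ⊢; omega)]
      rw [aProc]
  | cons l ls IH =>
    intro pre chunks hpre
    simp only [glLoop]
    have hfilter : (if l ≠ "" then pre.filter (fun x => x ≠ "") ++ [l]
          else pre.filter (fun x => x ≠ "")) = (pre ++ [l]).filter (fun x => x ≠ "") := by
      by_cases hl : l = "" <;> simp [List.filter_append, hl]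
    rw [hfilter]
    by_cases hc : (pre.length : Int) + 1 = gs
    · rw [if_pos hc]
      have h0 := IH [] (glFlush ((pre ++ [l]).filter (fun x => x ≠ "")) chunks) (by simp; omega)
      simp only [List.filter_nil, List.length_nil, Nat.cast_zero, List.nil_append] at h0
      rw [h0]
      have hg : gs.toNat = (pre ++ [l]).length := by simp; omega
      rw [show pre ++ l :: ls = (pre ++ [l]) ++ ls by simp]
      rw [aProc_step gs.toNat (by omega) ((pre ++ [l]) ++ ls) (by simp) chunks]
      rw [hg, List.take_left, List.drop_left]
    · rw [if_neg hc]
      have h1 := IH (pre ++ [l]) chunks (by simp; omega)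
      simp only [List.length_append, List.length_cons, List.length_nil, Nat.cast_add,
        Nat.cast_one, zero_add, List.append_assoc, List.cons_append,
        List.nil_append] at h1
      exact h1

-- ===== VERDICT (by name: the statement is the Claim_ definition above) =====
theorem group_lines_spec : Claim_equal_group_lines := by
  intro lines gs _
  unfold Spec_group_lines group_lines group_lines_alt
  by_cases h : gs ≤ 1
  · simp [h]
  · have hgs : 2 ≤ gs := by omega
    rw [if_neg h, if_neg h]
    have hB := B_loop gs hgs lines [] [] (by simpa using by omega)
    simp at hB
    rw [A_fold gs hgs lines.length lines rfl [], ← hB]
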